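-- pv_equiv track=rewrite | github.com/tahamajs/Datastructure_And_Algorithm_Course | CAc/CA2/code/3.py | find_max_valid_sequence
-- ===== SOURCE A (Python) =====
-- def find_max_valid_sequence(nodes):
--     stack = []
--     start_indices = {}
--     end_indices = {}
--     filtered_nodes = []
--
--     for i, node in enumerate(nodes):
--         if filtered_nodes and node == filtered_nodes[-1]:
--             continue
--
--         filtered_nodes.append(node)
--         end_indices[node] = len(filtered_nodes) - 1
--
--         if node not in start_indices:
--             start_indices[node] = len(filtered_nodes) - 1
--
--     max_depth = 0
--     current_depth = 0
--     bad_sequence = False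
--
--     for i, node in enumerate(filtered_nodes):
--         if i == start_indices[node] and i == end_indices[node]:
--             current_depth += 1
--             max_depth = max(max_depth, current_depth)
--             current_depth -= 1
--             continue
--
--         if i == start_indices[node]:
--             stack.append(node)
--             current_depth += 1
--
--         if i == end_indices[node]:
--             if stack and stack[-1] == node:
--                 stack.pop()
--                 current_depth -= 1
--             else:
--                 bad_sequence = True
--                 break
--
--         max_depth = max(max_depth, current_depth)
--
--     if stack:
--         bad_sequence = True
--
--     return max_depth if not bad_sequence else -1
-- ===== SOURCE B (Python) =====
-- def find_max_valid_sequence(nodes):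
--     # Dedup consecutive equal values: keep x iff it differs from its predecessor.
--     filtered = [x for i, x in enumerate(nodes) if i == 0 or x != nodes[i - 1]]
--     n = len(filtered)
--     # One interval [first occurrence, last occurrence] per distinct value.
--     starts = [p for p, x in enumerate(filtered) if x not in filtered[:p]]
--     ivs = [(s, max((q for q, y in enumerate(filtered) if y == filtered[s]), default=0))
--            for s in starts]
--     # Invalid iff two intervals cross.
--     for s1, e1 in ivs:
--         for s2, e2 in ivs:
--             if s1 < s2 <= e1 < e2:
--                 return -1
--     # Max nesting depth = max number of intervals covering one position.
--     return max((sum(1 for s, e in ivs if s <= i <= e) for i in range(n)), default=0)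
-- ===== Notes on version B (the rewrite author's own statement) =====
-- stated objective: alternative
-- what changed: Replaces A's stateful stack sweep (push at first index, pop-and-match at last index, break on mismatch, leftover-stack check) by an interval formulation: one [first,last] interval per distinct value of the consecutively-deduplicated list, validity decided by a pairwise interval-crossing test, and the depth computed as the maximum number of intervals covering a single position.
import Mathlib
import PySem

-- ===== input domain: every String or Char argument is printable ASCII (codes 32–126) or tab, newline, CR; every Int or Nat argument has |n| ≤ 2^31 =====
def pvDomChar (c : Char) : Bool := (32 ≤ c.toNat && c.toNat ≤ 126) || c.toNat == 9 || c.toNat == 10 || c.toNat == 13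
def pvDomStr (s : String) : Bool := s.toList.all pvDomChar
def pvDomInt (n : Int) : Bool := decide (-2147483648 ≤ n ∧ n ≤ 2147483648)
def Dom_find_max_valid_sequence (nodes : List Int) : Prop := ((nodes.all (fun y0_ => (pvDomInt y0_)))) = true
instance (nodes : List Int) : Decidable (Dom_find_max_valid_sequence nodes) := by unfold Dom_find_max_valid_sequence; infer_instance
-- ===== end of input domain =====

-- B replaces A's position-by-position stack sweep by an interval view: one [first,last]
-- interval per distinct value, a pairwise crossing test for validity, and the depth as the
-- max number of intervals covering a position ('alternative': different algorithm, not faster).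

-- ===== PORT A =====
-- first loop: dedup consecutive equals, record start/end indices (state: filtered, end_indices, start_indices)
def pvAStep1 (st : List Int × PySem.Dict Int Int × PySem.Dict Int Int) (node : Int) :
    List Int × PySem.Dict Int Int × PySem.Dict Int Int :=
  if st.1 ≠ [] ∧ PySem.List.pyGet? st.1 (-1) = some node then st
  else
    let filtered := st.1 ++ [node]
    let endD := st.2.1.insert node ((filtered.length : Int) - 1)
    let startD := if st.2.2.contains node then st.2.2 else st.2.2.insert node ((filtered.length : Int) - 1)
    (filtered, endD, startD)

-- second loop: the stack sweep (state: stack, current_depth, max_depth, bad_sequence; once bad, the loop broke)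
def pvAStep2 (startD endD : PySem.Dict Int Int) (st : List Int × Int × Int × Bool)
    (p : Int × Int) : List Int × Int × Int × Bool :=
  if st.2.2.2 then st
  else
    let s := (startD.get? p.2).getD 0
    let e := (endD.get? p.2).getD 0
    if p.1 = s ∧ p.1 = e then (st.1, st.2.1, max st.2.2.1 (st.2.1 + 1), false)
    else
      let stack := if p.1 = s then st.1 ++ [p.2] else st.1
      let cur := if p.1 = s then st.2.1 + 1 else st.2.1
      if p.1 = e then
        if stack ≠ [] ∧ PySem.List.pyGet? stack (-1) = some p.2 then
          (stack.dropLast, cur - 1, max st.2.2.1 (cur - 1), false)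
        else (stack, cur, st.2.2.1, true)
      else (stack, cur, max st.2.2.1 cur, false)

def find_max_valid_sequence (nodes : List Int) : Int :=
  let st1 := nodes.foldl pvAStep1 ([], PySem.Dict.empty, PySem.Dict.empty)
  let fin := (PySem.List.enumerate st1.1).foldl (pvAStep2 st1.2.2 st1.2.1) ([], 0, 0, false)
  if fin.2.2.2 ∨ fin.1 ≠ [] then -1 else fin.2.2.1

-- ===== PORT B =====
def find_max_valid_sequence_alt (nodes : List Int) : Int :=
  let filtered := ((PySem.List.enumerate nodes).filter
      (fun p => p.1 == 0 || !(PySem.List.pyGetD nodes (p.1 - 1) 0 == p.2))).map (·.2)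
  let n : Int := (filtered.length : Int)
  let starts := ((PySem.List.enumerate filtered).filter
      (fun p => !(PySem.List.slice filtered none (some p.1)).contains p.2)).map (·.1)
  let ivs := starts.map (fun s =>
      (s, PySem.List.maxD (((PySem.List.enumerate filtered).filter
            (fun q => q.2 == PySem.List.pyGetD filtered s 0)).map (·.1)) (fun q => q) 0))
  if ivs.any (fun p1 => ivs.any (fun p2 => p1.1 < p2.1 && p2.1 ≤ p1.2 && p1.2 < p2.2)) then -1
  else PySem.List.maxD ((PySem.List.pyRange 0 n).map
      (fun i => (ivs.map (fun p => if p.1 ≤ i ∧ i ≤ p.2 then (1 : Int) else 0)).sum)) (fun x => x) 0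

-- ===== PRECONDITION & SPEC =====
def Spec_find_max_valid_sequence (nodes : List Int) (out : Int) : Prop := out = find_max_valid_sequence_alt nodes
instance (nodes : List Int) (out : Int) : Decidable (Spec_find_max_valid_sequence nodes out) := by unfold Spec_find_max_valid_sequence; infer_instance

-- ===== CLAIM (what is proved, stated in full; the proofs are below) =====
def Claim_equal_find_max_valid_sequence : Prop := ∀ (nodes : List Int), Dom_find_max_valid_sequence nodes → Spec_find_max_valid_sequence nodes (find_max_valid_sequence nodes)

-- ===== LEMMAS AND PROOFS =====

-- ========== proof-side definitions ==========

-- the deduped list both programs work on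
def pvInit : List Int × PySem.Dict Int Int × PySem.Dict Int Int := ([], PySem.Dict.empty, PySem.Dict.empty)
def pvF (nodes : List Int) : List Int := (nodes.foldl pvAStep1 pvInit).1

def pvVal (f : List Int) (p : Nat) : Int := f.getD p 0
def pvS (f : List Int) (v : Int) : Nat := List.idxOf v f
def pvE (f : List Int) (v : Int) : Nat := f.length - 1 - List.idxOf v f.reverse
abbrev pvStart (f : List Int) (p : Nat) : Prop := pvS f (pvVal f p) = p

def pvOpen (f : List Int) (t : Nat) : List Nat :=
  (List.range f.length).filter (fun p => decide (pvStart f p ∧ p < t ∧ t ≤ pvE f (pvVal f p)))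
def pvCovL (f : List Int) (i : Nat) : List Nat :=
  (List.range f.length).filter (fun p => decide (pvStart f p ∧ p ≤ i ∧ i ≤ pvE f (pvVal f p)))
def pvCov (f : List Int) (i : Nat) : Nat := (pvCovL f i).length
def pvMaxAt (f : List Int) (t : Nat) : Int :=
  (List.range t).foldl (fun m i => max m ((pvCov f i : Int))) 0
def pvBadAt (f : List Int) (i : Nat) : Prop :=
  pvS f (pvVal f i) < i ∧ pvE f (pvVal f i) = i ∧
    ∃ q, q < i ∧ pvStart f q ∧ pvS f (pvVal f i) < q ∧ i ≤ pvE f (pvVal f q)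
def pvBad (f : List Int) (t : Nat) : Prop := ∃ i, i < t ∧ pvBadAt f i
def pvCross (f : List Int) : Prop :=
  ∃ p q, p < f.length ∧ q < f.length ∧ pvStart f p ∧ pvStart f q ∧ p < q ∧
    q ≤ pvE f (pvVal f p) ∧ pvE f (pvVal f p) < pvE f (pvVal f q)

def pvStepK (f : List Int) (st : List Int × Int × Int × Bool) (k : Nat) :
    List Int × Int × Int × Bool :=
  if st.2.2.2 then st
  else
    let v := pvVal f k
    if k = pvS f v ∧ k = pvE f v then (st.1, st.2.1, max st.2.2.1 (st.2.1 + 1), false)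
    else
      let stack := if k = pvS f v then st.1 ++ [v] else st.1
      let cur := if k = pvS f v then st.2.1 + 1 else st.2.1
      if k = pvE f v then
        if stack ≠ [] ∧ stack.getLast? = some v then
          (stack.dropLast, cur - 1, max st.2.2.1 (cur - 1), false)
        else (stack, cur, st.2.2.1, true)
      else (stack, cur, max st.2.2.1 cur, false)

def pvRunA (f : List Int) (t : Nat) : List Int × Int × Int × Bool :=
  (List.range t).foldl (pvStepK f) ([], 0, 0, false)

-- ========== generic little lemmas ==========

lemma pvPyGetNegOne (xs : List Int) : PySem.List.pyGet? xs (-1) = xs.getLast? := by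
  cases xs with
  | nil => rfl
  | cons a l =>
    have h1 : ¬ ((0:Int) ≤ -1) := by norm_num
    have h2 : -((a::l).length : Int) ≤ -1 := by simp
    simp only [PySem.List.pyGet?, PySem.List.pyIdx?, if_neg h1, if_pos h2,
      List.getLast?_eq_getElem?]
    norm_num

lemma pvIdxOf_le {v : Int} {l : List Int} {k : Nat} (hk : k < l.length) (h : l[k] = v) :
    List.idxOf v l ≤ k := by
  induction l generalizing k with
  | nil => simp at hk
  | cons a t ih =>
    cases k with
    | zero => simp at h; simp [h, List.idxOf_cons_self]
    | succ k =>
      by_cases hav : a = v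
      · simp [hav, List.idxOf_cons_self]
      · rw [List.idxOf_cons_ne _ (by simpa using hav)]
        have := ih (k := k) (by simpa using hk) (by simpa using h)
        omega

lemma pvMemTake {v : Int} {l : List Int} {k : Nat} (hv : v ∈ l) :
    v ∈ l.take k ↔ List.idxOf v l < k := by
  constructor
  · intro h
    rcases List.mem_take_iff_getElem.mp h with ⟨j, hj, hjv⟩
    have := pvIdxOf_le (k := j) (by omega) hjv
    omega
  · intro h
    have hlt : List.idxOf v l < l.length := List.idxOf_lt_length_of_mem hv
    exact List.mem_take_iff_getElem.mpr ⟨List.idxOf v l, by omega, List.getElem_idxOf hlt⟩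

-- ========== facts about pvS / pvE ==========

lemma pvVal_mem {f : List Int} {k : Nat} (hk : k < f.length) : pvVal f k ∈ f := by
  rw [pvVal, List.getD_eq_getElem f 0 hk]; exact List.getElem_mem hk

lemma pvS_lt {f : List Int} {v : Int} (h : v ∈ f) : pvS f v < f.length :=
  List.idxOf_lt_length_of_mem h

lemma pvVal_pvS {f : List Int} {v : Int} (h : v ∈ f) : pvVal f (pvS f v) = v := by
  rw [pvVal, List.getD_eq_getElem f 0 (pvS_lt h)]
  exact List.getElem_idxOf (pvS_lt h)

lemma pvS_le {f : List Int} {k : Nat} (hk : k < f.length) : pvS f (pvVal f k) ≤ k := by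
  apply pvIdxOf_le hk
  rw [pvVal, List.getD_eq_getElem f 0 hk]

lemma pvE_lt {f : List Int} {v : Int} (h : v ∈ f) : pvE f v < f.length := by
  have h0 : f.length ≠ 0 := by
    intro h0; rw [List.length_eq_zero_iff] at h0; simp [h0] at h
  have : List.idxOf v f.reverse < f.length := by
    have := List.idxOf_lt_length_of_mem (by simpa using h : v ∈ f.reverse)
    simpa using this
  simp only [pvE]; omega

lemma pvVal_pvE {f : List Int} {v : Int} (h : v ∈ f) : pvVal f (pvE f v) = v := by
  have hr : v ∈ f.reverse := by simpa using h
  have hlt : List.idxOf v f.reverse < f.length := by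
    have := List.idxOf_lt_length_of_mem hr; simpa using this
  have hg : f.reverse[List.idxOf v f.reverse]'(by simpa using hlt) = v :=
    List.getElem_idxOf (by simpa using hlt)
  rw [List.getElem_reverse] at hg
  rw [pvVal, List.getD_eq_getElem f 0 (pvE_lt h)]
  simp only [pvE]
  simpa using hg

lemma pvle_E {f : List Int} {k : Nat} (hk : k < f.length) : k ≤ pvE f (pvVal f k) := by
  have hrk : f.length - 1 - k < f.reverse.length := by simp; omega
  have : f.reverse[f.length - 1 - k]'hrk = pvVal f k := by
    rw [List.getElem_reverse]
    rw [pvVal, List.getD_eq_getElem f 0 hk]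
    congr 1; omega
  have hle := pvIdxOf_le hrk this
  simp only [pvE]; omega

lemma pvStart_inj {f : List Int} {p q : Nat} (hp : pvStart f p) (hq : pvStart f q)
    (h : pvVal f p = pvVal f q) : p = q := by
  rw [pvStart] at hp hq; rw [← hp, ← hq, h]

-- value at the end position of v's interval is v, so two values cannot share an end
lemma pvE_val_eq {f : List Int} {p : Nat} (hp : p < f.length) {t : Nat} (_ht : t < f.length)
    (h : pvE f (pvVal f p) = t) : pvVal f t = pvVal f p := by
  rw [← h]; exact pvVal_pvE (pvVal_mem hp)

-- ========== filter-over-range helpers ==========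

lemma pvFilterRangeTrunc (n a : Nat) (P : Nat → Bool) (ha : a ≤ n)
    (h : ∀ p, a ≤ p → p < n → P p = false) :
    (List.range n).filter P = (List.range a).filter P := by
  have hn : n = a + (n - a) := by omega
  rw [hn, List.range_add, List.filter_append]
  have hnil : (List.map (fun x => a + x) (List.range (n - a))).filter P = [] := by
    rw [List.filter_eq_nil_iff]
    intro x hx
    rcases List.mem_map.mp hx with ⟨k, hk, rfl⟩
    have hk' := List.mem_range.mp hk
    simp [h (a + k) (by omega) (by omega)]
  rw [hnil, List.append_nil]

lemma pvFilterRangeSplit (n a : Nat) (P : Nat → Bool) (ha : a < n)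
    (h : ∀ p, a < p → p < n → P p = false) (hPa : P a = true) :
    (List.range n).filter P = (List.range a).filter P ++ [a] := by
  rw [pvFilterRangeTrunc n (a + 1) P (by omega) (fun p hp hpn => h p (by omega) hpn)]
  rw [List.range_succ, List.filter_append]
  simp [hPa]

lemma pvLastGe {l : List Nat} (hs : l.Pairwise (· < ·)) {x : Nat} (hx : x ∈ l) (h : l ≠ []) :
    x ≤ l.getLast h := by
  induction l with
  | nil => simp at hx
  | cons a t ih =>
    rcases List.mem_cons.mp hx with hxa | hxt
    · cases t with
      | nil => simp [List.getLast, hxa]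
      | cons b u =>
        have hlt : a < (b :: u).getLast (by simp) :=
          (List.pairwise_cons.mp hs).1 _ (List.getLast_mem (by simp))
        rw [List.getLast_cons (by simp)]
        omega
    · cases t with
      | nil => simp at hxt
      | cons b u =>
        rw [List.getLast_cons (by simp)]
        exact ih (List.pairwise_cons.mp hs).2 hxt (by simp)

-- ========== structure of pvOpen / pvCovL ==========

lemma pvOpen_sorted (f : List Int) (t : Nat) : (pvOpen f t).Pairwise (· < ·) :=
  List.Pairwise.filter _ List.pairwise_lt_range

lemma pvMem_open {f : List Int} {t p : Nat} :
    p ∈ pvOpen f t ↔ p < f.length ∧ pvStart f p ∧ p < t ∧ t ≤ pvE f (pvVal f p) := by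
  simp [pvOpen, List.mem_filter, List.mem_range]

lemma pvE_ne_of_start {f : List Int} {p t : Nat} (hp : p < f.length) (ht : t < f.length)
    (hps : pvStart f p) (hne : p ≠ pvS f (pvVal f t)) : pvE f (pvVal f p) ≠ t := by
  intro h
  have hv : pvVal f t = pvVal f p := pvE_val_eq hp ht h
  exact hne (by rw [hv]; exact hps.symm)

lemma pvMaxAt_succ (f : List Int) (t : Nat) :
    pvMaxAt f (t + 1) = max (pvMaxAt f t) ((pvCov f t : Int)) := by
  simp only [pvMaxAt]
  rw [List.range_succ, List.foldl_append]
  rfl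

lemma pvOpen_succ_point {f : List Int} {t : Nat} (ht : t < f.length)
    (hs : pvS f (pvVal f t) = t) (he : pvE f (pvVal f t) = t) :
    pvOpen f (t + 1) = pvOpen f t := by
  apply List.filter_congr
  intro p hp
  have hpn := List.mem_range.mp hp
  simp only [decide_eq_decide]
  rcases eq_or_ne p t with heq | hne
  · constructor
    · rintro ⟨-, -, hle⟩; rw [heq] at hle; omega
    · rintro ⟨-, hlt, -⟩; omega
  · constructor
    · rintro ⟨hst, hlt, hle⟩
      refine ⟨hst, by omega, ?_⟩
      have hps : p ≠ pvS f (pvVal f t) := by omega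
      have := pvE_ne_of_start hpn ht hst hps; omega
    · rintro ⟨hst, hlt, hle⟩
      refine ⟨hst, by omega, ?_⟩
      have hps : p ≠ pvS f (pvVal f t) := by omega
      have := pvE_ne_of_start hpn ht hst hps; omega

lemma pvOpen_succ_mid {f : List Int} {t : Nat} (ht : t < f.length)
    (hs : pvS f (pvVal f t) < t) (he : t < pvE f (pvVal f t)) :
    pvOpen f (t + 1) = pvOpen f t := by
  apply List.filter_congr
  intro p hp
  have hpn := List.mem_range.mp hp
  simp only [decide_eq_decide]
  rcases eq_or_ne p t with heq | hne
  · have hnst : ¬ pvStart f p := by rw [pvStart, heq]; omega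
    constructor
    · rintro ⟨hst, -, -⟩; exact absurd hst hnst
    · rintro ⟨hst, -, -⟩; exact absurd hst hnst
  · constructor
    · rintro ⟨hst, hlt, hle⟩; exact ⟨hst, by omega, by omega⟩
    · rintro ⟨hst, hlt, hle⟩
      refine ⟨hst, by omega, ?_⟩
      by_cases hps : p = pvS f (pvVal f t)
      · rw [hps]
        have hv : pvVal f (pvS f (pvVal f t)) = pvVal f t := pvVal_pvS (pvVal_mem ht)
        rw [hv]
        rw [hps, hv] at hle
        omega
      · have := pvE_ne_of_start hpn ht hst hps; omega

lemma pvOpen_succ_start {f : List Int} {t : Nat} (ht : t < f.length)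
    (hs : pvS f (pvVal f t) = t) (he : t < pvE f (pvVal f t)) :
    pvOpen f (t + 1) = pvOpen f t ++ [t] := by
  rw [pvOpen, pvFilterRangeSplit f.length t _ ht ?side ?at_t]
  case side =>
    intro p hp hpn
    simp only [decide_eq_false_iff_not]
    rintro ⟨-, hlt, -⟩; omega
  case at_t =>
    simp only [decide_eq_true_eq]
    exact ⟨hs, by omega, by omega⟩
  congr 1
  rw [pvOpen, pvFilterRangeTrunc f.length t _ (by omega) ?side2]
  case side2 =>
    intro p hp hpn
    simp only [decide_eq_false_iff_not]
    rintro ⟨-, hlt, -⟩; omega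
  apply List.filter_congr
  intro p hp
  have hpn := List.mem_range.mp hp
  simp only [decide_eq_decide]
  constructor
  · rintro ⟨hst, -, hle⟩; exact ⟨hst, by omega, by omega⟩
  · rintro ⟨hst, -, hle⟩
    refine ⟨hst, by omega, ?_⟩
    have hps : p ≠ pvS f (pvVal f t) := by omega
    have := pvE_ne_of_start (show p < f.length by omega) ht hst hps; omega

lemma pvCov_of_start {f : List Int} {t : Nat} (ht : t < f.length)
    (hs : pvS f (pvVal f t) = t) : pvCovL f t = pvOpen f t ++ [t] := by
  rw [pvCovL, pvFilterRangeSplit f.length t _ ht ?side ?at_t]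
  case side =>
    intro p hp hpn
    simp only [decide_eq_false_iff_not]
    rintro ⟨-, hle, -⟩; omega
  case at_t =>
    simp only [decide_eq_true_eq]
    exact ⟨hs, le_refl t, pvle_E ht⟩
  congr 1
  rw [pvOpen, pvFilterRangeTrunc f.length t _ (by omega) ?side2]
  case side2 =>
    intro p hp hpn
    simp only [decide_eq_false_iff_not]
    rintro ⟨-, hlt, -⟩; omega
  apply List.filter_congr
  intro p hp
  have hpn := List.mem_range.mp hp
  simp only [decide_eq_decide]
  constructor
  · rintro ⟨hst, -, hle⟩; exact ⟨hst, by omega, hle⟩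
  · rintro ⟨hst, -, hle⟩; exact ⟨hst, by omega, hle⟩

lemma pvCov_of_nonstart {f : List Int} {t : Nat} (_ht : t < f.length)
    (hs : pvS f (pvVal f t) < t) : pvCovL f t = pvOpen f t := by
  apply List.filter_congr
  intro p hp
  have hpn := List.mem_range.mp hp
  simp only [decide_eq_decide]
  rcases eq_or_ne p t with heq | hne
  · have hnst : ¬ pvStart f p := by rw [pvStart, heq]; omega
    constructor
    · rintro ⟨hst, -, -⟩; exact absurd hst hnst
    · rintro ⟨hst, -, -⟩; exact absurd hst hnst
  · constructor
    · rintro ⟨hst, hle, hle2⟩; exact ⟨hst, by omega, hle2⟩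
    · rintro ⟨hst, hlt, hle⟩; exact ⟨hst, by omega, hle⟩

-- ========== the sweep invariant ==========

lemma pvCovLe {f : List Int} {t : Nat} (ht : t < f.length) (hs : pvS f (pvVal f t) < t) :
    ((pvCov f t : Int)) ≤ pvMaxAt f t := by
  have h1 : pvCov f t ≤ pvCov f (t - 1) := by
    rw [pvCov, pvCov, pvCov_of_nonstart ht hs, pvCovL, pvOpen,
      ← List.countP_eq_length_filter, ← List.countP_eq_length_filter]
    apply List.countP_mono_left
    intro p hp hP
    simp only [decide_eq_true_eq] at hP ⊢
    obtain ⟨ha, hb, hc⟩ := hP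
    exact ⟨ha, by omega, by omega⟩
  have h2 := (PySem.List.le_foldl_max_int (List.range t) (fun i => ((pvCov f i : Int))) 0).2
    ((t : Nat) - 1) (List.mem_range.mpr (by omega))
  have h3 : pvMaxAt f t = (List.range t).foldl (fun acc y => max acc ((pvCov f y : Int))) 0 := rfl
  simp only at h2
  omega

lemma pvBad_succ (f : List Int) (t : Nat) : pvBad f (t + 1) ↔ pvBad f t ∨ pvBadAt f t := by
  constructor
  · rintro ⟨i, hi, h⟩
    by_cases hit : i < t
    · exact Or.inl ⟨i, hit, h⟩
    · have : i = t := by omega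
      exact Or.inr (this ▸ h)
  · rintro (⟨i, hi, h⟩ | h)
    · exact ⟨i, by omega, h⟩
    · exact ⟨t, by omega, h⟩

lemma pvClose_nobad {f : List Int} {t : Nat} (ht : t < f.length)
    (hs : pvS f (pvVal f t) < t) (he : pvE f (pvVal f t) = t) (hnb : ¬ pvBadAt f t) :
    pvOpen f t = pvOpen f (t + 1) ++ [pvS f (pvVal f t)] := by
  have hq : ∀ q, q < t → pvStart f q → pvS f (pvVal f t) < q → ¬ (t ≤ pvE f (pvVal f q)) := by
    intro q h1 h2 h3 h4
    exact hnb ⟨hs, he, q, h1, h2, h3, h4⟩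
  have hv : pvVal f (pvS f (pvVal f t)) = pvVal f t := pvVal_pvS (pvVal_mem ht)
  have hsn : pvS f (pvVal f t) < f.length := pvS_lt (pvVal_mem ht)
  rw [pvOpen, pvFilterRangeSplit f.length (pvS f (pvVal f t)) _ hsn ?side ?at_s]
  case side =>
    intro p hp hpn
    simp only [decide_eq_false_iff_not]
    rintro ⟨hst, hlt, hle⟩
    exact hq p hlt hst hp hle
  case at_s =>
    simp only [decide_eq_true_eq]
    refine ⟨?_, hs, ?_⟩
    · rw [pvStart, hv]
    · rw [hv, he]
  congr 1
  rw [pvOpen, pvFilterRangeTrunc f.length (pvS f (pvVal f t)) _ (by omega) ?side2]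
  case side2 =>
    intro p hp hpn
    simp only [decide_eq_false_iff_not]
    rintro ⟨hst, hlt, hle⟩
    rcases eq_or_ne p (pvS f (pvVal f t)) with heq | hne
    · rw [heq, hv, he] at hle; omega
    · have hps : pvS f (pvVal f t) < p := by omega
      rcases eq_or_ne p t with heq2 | hne2
      · have : ¬ pvStart f p := by rw [pvStart, heq2]; omega
        exact this hst
      · exact hq p (by omega) hst hps (by omega)
  apply List.filter_congr
  intro p hp
  have hpn := List.mem_range.mp hp
  simp only [decide_eq_decide]
  constructor
  · rintro ⟨hst, -, hle⟩
    refine ⟨hst, by omega, ?_⟩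
    have hps : p ≠ pvS f (pvVal f t) := by omega
    have := pvE_ne_of_start (show p < f.length by omega) ht hst hps
    omega
  · rintro ⟨hst, -, hle⟩
    exact ⟨hst, by omega, by omega⟩

lemma pvRunA_succ (f : List Int) (t : Nat) :
    pvRunA f (t + 1) = pvStepK f (pvRunA f t) t := by
  simp [pvRunA, List.range_succ]

lemma pvRunA_spec (f : List Int) (t : Nat) (ht : t ≤ f.length) :
    (pvBad f t → (pvRunA f t).2.2.2 = true) ∧
    (¬ pvBad f t → pvRunA f t =
      ((pvOpen f t).map (pvVal f), ((pvOpen f t).length : Int), pvMaxAt f t, false)) := by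
  induction t with
  | zero =>
    constructor
    · rintro ⟨i, hi, -⟩; omega
    · intro _
      have hop : pvOpen f 0 = [] := by
        rw [pvOpen, List.filter_eq_nil_iff]
        intro p hp
        simp only [decide_eq_true_eq]
        rintro ⟨-, h, -⟩; omega
      simp [pvRunA, hop, pvMaxAt]
  | succ t ih =>
    obtain ⟨ihbad, ihgood⟩ := ih (by omega)
    have htn : t < f.length := by omega
    have hsle : pvS f (pvVal f t) ≤ t := pvS_le htn
    have hele : t ≤ pvE f (pvVal f t) := pvle_E htn
    have hvmem : pvVal f t ∈ f := pvVal_mem htn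
    have hvS : pvVal f (pvS f (pvVal f t)) = pvVal f t := pvVal_pvS hvmem
    by_cases hbt : pvBad f t
    · -- previous state already bad: the step is the identity on it
      have hb := ihbad hbt
      have hstep : pvRunA f (t + 1) = pvRunA f t := by
        rw [pvRunA_succ, pvStepK, if_pos hb]
      constructor
      · intro _; rw [hstep]; exact hb
      · intro hc; exact absurd ((pvBad_succ f t).mpr (Or.inl hbt)) hc
    · have hgood := ihgood hbt
      by_cases hbat : pvBadAt f t
      · -- the step discovers the crossing: bad is set
        have hbat' := hbat
        obtain ⟨hs, he, q, hq1, hq2, hq3, hq4⟩ := hbat'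
        have hqmem : q ∈ pvOpen f t := by
          rw [pvMem_open]
          exact ⟨by omega, hq2, hq1, hq4⟩
        have hne : pvOpen f t ≠ [] := List.ne_nil_of_mem hqmem
        have hlastmem := List.getLast_mem hne
        have hlast := pvMem_open.mp hlastmem
        have hql := pvLastGe (pvOpen_sorted f t) hqmem hne
        have hvne : pvVal f ((pvOpen f t).getLast hne) ≠ pvVal f t := by
          intro hvv
          have hstl : pvS f (pvVal f ((pvOpen f t).getLast hne)) = (pvOpen f t).getLast hne :=
            hlast.2.1
          rw [hvv] at hstl
          omega
        have hmapne : List.map (pvVal f) (pvOpen f t) ≠ [] := by simpa using hne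
        have hlq : (List.map (pvVal f) (pvOpen f t)).getLast? =
            some (pvVal f ((pvOpen f t).getLast hne)) := by
          rw [List.getLast?_eq_some_getLast hmapne, List.getLast_map]
        have hc1 : ¬ (t = pvS f (pvVal f t)) := by omega
        have hc2 : t = pvE f (pvVal f t) := he.symm
        have hbval : (pvRunA f (t + 1)).2.2.2 = true := by
          rw [pvRunA_succ, hgood]
          simp [pvStepK, hc1, ← hc2, hlq, hvne]
        constructor
        · intro _; exact hbval
        · intro hc; exact absurd ((pvBad_succ f t).mpr (Or.inr hbat)) hc
      · -- no bad event at t: compute the new good state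
        have hnb1 : ¬ pvBad f (t + 1) := by
          rw [pvBad_succ]; rintro (h | h) <;> [exact hbt h; exact hbat h]
        refine ⟨fun hb => absurd hb hnb1, fun _ => ?_⟩
        rw [pvRunA_succ, hgood]
        rcases eq_or_lt_of_le hsle with hseq | hslt
        · rcases eq_or_lt_of_le hele with heeq | helt
          · -- point: s = t = e
            have hOp := pvOpen_succ_point htn hseq heeq.symm
            have hCov : pvCovL f t = pvOpen f t ++ [t] := pvCov_of_start htn hseq
            have hcv : (pvCov f t : Int) = ((pvOpen f t).length : Int) + 1 := by
              rw [pvCov, hCov]; push_cast [List.length_append, List.length_cons, List.length_nil]; omega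
            have hc1 : t = pvS f (pvVal f t) := hseq.symm
            have hc2 : t = pvE f (pvVal f t) := heeq
            simp [pvStepK, ← hc1, ← hc2, hOp, pvMaxAt_succ, hcv]
          · -- open: s = t < e
            have hOp := pvOpen_succ_start htn hseq helt
            have hCov : pvCovL f t = pvOpen f t ++ [t] := pvCov_of_start htn hseq
            have hcv : (pvCov f t : Int) = ((pvOpen f t).length : Int) + 1 := by
              rw [pvCov, hCov]; push_cast [List.length_append, List.length_cons, List.length_nil]; omega
            have hc1 : t = pvS f (pvVal f t) := hseq.symm
            have hc2 : ¬ (t = pvE f (pvVal f t)) := by omega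
            have hvt : pvVal f t = pvVal f (pvS f (pvVal f t)) := hvS.symm
            simp [pvStepK, ← hc1, hc2, hOp, pvMaxAt_succ, hcv]
        · rcases eq_or_lt_of_le hele with heeq | helt
          · -- close: s < t = e, no crossing at t
            have hOp := pvClose_nobad htn hslt heeq.symm hbat
            have hCovL : pvCovL f t = pvOpen f t := pvCov_of_nonstart htn hslt
            have hcv : (pvCov f t : Int) = ((pvOpen f t).length : Int) := by
              rw [pvCov, hCovL]
            have hlen : (pvOpen f t).length = (pvOpen f (t + 1)).length + 1 := by
              rw [hOp]; simp
            have hmax := pvCovLe htn hslt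
            have hc1 : ¬ (t = pvS f (pvVal f t)) := by omega
            have hc2 : t = pvE f (pvVal f t) := heeq
            have hstack : List.map (pvVal f) (pvOpen f t) =
                List.map (pvVal f) (pvOpen f (t + 1)) ++ [pvVal f t] := by
              rw [hOp, List.map_append, List.map_cons, List.map_nil, hvS]
            simp [pvStepK, hc1, ← hc2, hstack, pvMaxAt_succ]
            constructor
            · omega
            · rw [max_eq_left (by omega), max_eq_left (by omega)]
          · -- mid: s < t < e
            have hOp := pvOpen_succ_mid htn hslt helt
            have hCovL : pvCovL f t = pvOpen f t := pvCov_of_nonstart htn hslt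
            have hcv : (pvCov f t : Int) = ((pvOpen f t).length : Int) := by
              rw [pvCov, hCovL]
            have hmax := pvCovLe htn hslt
            have hc1 : ¬ (t = pvS f (pvVal f t)) := by omega
            have hc2 : ¬ (t = pvE f (pvVal f t)) := by omega
            simp [pvStepK, hc1, hc2, hOp, pvMaxAt_succ]
            rw [max_eq_left (by omega), max_eq_left (by omega)]

-- ========== bad events are exactly crossings ==========

lemma pvBad_iff_cross (f : List Int) : pvBad f f.length ↔ pvCross f := by
  constructor
  · rintro ⟨i, hi, hs, he, q, hq1, hq2, hq3, hq4⟩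
    have hvm : pvVal f i ∈ f := pvVal_mem hi
    have hvi : pvVal f (pvS f (pvVal f i)) = pvVal f i := pvVal_pvS hvm
    refine ⟨pvS f (pvVal f i), q, pvS_lt hvm, by omega, ?_, hq2, hq3, ?_, ?_⟩
    · rw [pvStart, hvi]
    · rw [hvi, he]; omega
    · rw [hvi, he]
      rcases eq_or_lt_of_le hq4 with heq | h
      · exfalso
        have hvq : pvVal f i = pvVal f q := pvE_val_eq (by omega) hi heq.symm
        have : pvS f (pvVal f i) = q := by rw [hvq]; exact hq2
        omega
      · exact h
  · rintro ⟨p, q, hp, hq, hps, hqs, hpq, hle, hlt⟩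
    have hvm : pvVal f p ∈ f := pvVal_mem hp
    have hvi : pvVal f (pvE f (pvVal f p)) = pvVal f p := pvVal_pvE hvm
    have hEp : pvE f (pvVal f p) < f.length := pvE_lt hvm
    have hqlt : q < pvE f (pvVal f p) := by
      rcases eq_or_lt_of_le hle with heq | h
      · exfalso
        have hvq : pvVal f p = pvVal f q := by rw [← heq] at hvi; exact hvi.symm ▸ (by rw [← hvi, heq])
        have : p = q := pvStart_inj hps hqs hvq
        omega
      · exact h
    refine ⟨pvE f (pvVal f p), hEp, ?_, ?_, q, hqlt, hqs, ?_, ?_⟩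
    · rw [hvi, hps]; omega
    · rw [hvi]
    · rw [hvi, hps]; omega
    · omega

-- ========== characterisation of A's first loop ==========

lemma pvFold1_spec (l : List Int) :
    ((l.foldl pvAStep1 pvInit).1.getLast? = l.getLast?) ∧
    (∀ v : Int, (l.foldl pvAStep1 pvInit).2.1.get? v =
      if v ∈ (l.foldl pvAStep1 pvInit).1
      then some ((pvE (l.foldl pvAStep1 pvInit).1 v : Int)) else none) ∧
    (∀ v : Int, (l.foldl pvAStep1 pvInit).2.2.get? v =
      if v ∈ (l.foldl pvAStep1 pvInit).1
      then some ((pvS (l.foldl pvAStep1 pvInit).1 v : Int)) else none) := by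
  induction l using List.reverseRecOn with
  | nil => simp [pvInit, PySem.Dict.get?_empty]
  | append_singleton l x ih =>
    obtain ⟨ih1, ih2, ih3⟩ := ih
    rw [List.foldl_append] at *
    set st := l.foldl pvAStep1 pvInit with hst
    simp only [List.foldl_cons, List.foldl_nil]
    by_cases hc : st.1 ≠ [] ∧ PySem.List.pyGet? st.1 (-1) = some x
    · simp only [pvAStep1, if_pos hc]
      refine ⟨?_, ih2, ih3⟩
      rw [pvPyGetNegOne] at hc
      rw [List.getLast?_concat]
      exact hc.2
    · simp only [pvAStep1, if_neg hc]
      have hlen : ((st.1 ++ [x]).length : Int) - 1 = (st.1.length : Int) := by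
        push_cast [List.length_append, List.length_cons, List.length_nil]; ring
      have hmem : ∀ v : Int, v ∈ st.1 ++ [x] ↔ v ∈ st.1 ∨ v = x := by
        intro v; simp
      have hS : ∀ v : Int, v ∈ st.1 → pvS (st.1 ++ [x]) v = pvS st.1 v := by
        intro v hv; rw [pvS, pvS, List.idxOf_append, if_pos hv]
      have hSx : x ∉ st.1 → pvS (st.1 ++ [x]) x = st.1.length := by
        intro hx; rw [pvS, List.idxOf_append, if_neg hx]; simp
      have hE : ∀ v : Int, v ≠ x → pvE (st.1 ++ [x]) v = pvE st.1 v := by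
        intro v hv
        rw [pvE, pvE, List.reverse_append]
        simp only [List.reverse_cons, List.reverse_nil, List.nil_append, List.cons_append,
          List.length_append, List.length_cons, List.length_nil]
        rw [List.idxOf_cons_ne _ (by simpa using (Ne.symm hv))]
        omega
      have hEx : pvE (st.1 ++ [x]) x = st.1.length := by
        rw [pvE, List.reverse_append]
        simp only [List.reverse_cons, List.reverse_nil, List.nil_append, List.cons_append,
          List.length_append, List.length_cons, List.length_nil, List.nil_append]
        rw [List.idxOf_cons_self]
        omega
      have hcont : st.2.2.contains x = decide (x ∈ st.1) := by
        rw [PySem.Dict.contains_eq_isSome_get?, ih3 x]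
        by_cases hx : x ∈ st.1 <;> simp [hx]
      refine ⟨?_, ?_, ?_⟩
      · simp
      · intro v
        rcases eq_or_ne v x with rfl | hne
        · rw [PySem.Dict.get?_insert_self, if_pos (by simp), hEx, hlen]
        · rw [PySem.Dict.get?_insert_of_ne _ _ hne, ih2 v, hE v hne]
          by_cases hv : v ∈ st.1
          · rw [if_pos hv, if_pos (by simp [hv])]
          · rw [if_neg hv, if_neg (by simp [hv, hne])]
      · intro v
        by_cases hx : x ∈ st.1
        · rw [if_pos (show st.2.2.contains x = true by rw [hcont]; simp [hx])]
          rcases eq_or_ne v x with rfl | hne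
          · rw [ih3 v, if_pos hx, if_pos (by simp), hS v hx]
          · rw [ih3 v]
            by_cases hv : v ∈ st.1
            · rw [if_pos hv, if_pos (by simp [hv]), hS v hv]
            · rw [if_neg hv, if_neg (by simp [hv, hne])]
        · rw [if_neg (show ¬ (st.2.2.contains x = true) by rw [hcont]; simp [hx])]
          rcases eq_or_ne v x with rfl | hne
          · rw [PySem.Dict.get?_insert_self, if_pos (by simp), hSx hx, hlen]
          · rw [PySem.Dict.get?_insert_of_ne _ _ hne, ih3 v]
            by_cases hv : v ∈ st.1
            · rw [if_pos hv, if_pos (by simp [hv]), hS v hv]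
            · rw [if_neg hv, if_neg (by simp [hv, hne])]

-- ========== enumerate as a map over range ==========

lemma pvEnum (f : List Int) :
    PySem.List.enumerate f = (List.range f.length).map (fun (k : Nat) => ((k : Int), pvVal f k)) := by
  rw [PySem.List.enumerate_eq_map_pyRange f 0]
  have : PySem.List.len f = (f.length : Int) := by simp [PySem.List.len]
  rw [this, PySem.List.pyRange_zero, List.map_map]
  apply List.map_congr_left
  intro k hk
  simp [PySem.List.pyGetD_natCast, pvVal]

lemma pvOpen_full (f : List Int) : pvOpen f f.length = [] := by
  rw [pvOpen, List.filter_eq_nil_iff]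
  intro p hp
  have hpn := List.mem_range.mp hp
  simp only [decide_eq_true_eq]
  rintro ⟨-, -, hle⟩
  have := pvE_lt (pvVal_mem hpn)
  omega

-- ========== A computes the interval formula ==========

lemma pvA_fold (nodes : List Int) :
    (PySem.List.enumerate (nodes.foldl pvAStep1 ([], PySem.Dict.empty, PySem.Dict.empty)).1).foldl
      (pvAStep2 (nodes.foldl pvAStep1 ([], PySem.Dict.empty, PySem.Dict.empty)).2.2
        (nodes.foldl pvAStep1 ([], PySem.Dict.empty, PySem.Dict.empty)).2.1)
      ([], 0, 0, false) = pvRunA (pvF nodes) (pvF nodes).length := by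
  rw [show (([], PySem.Dict.empty, PySem.Dict.empty) :
      List Int × PySem.Dict Int Int × PySem.Dict Int Int) = pvInit from rfl]
  obtain ⟨h1, h2, h3⟩ := pvFold1_spec nodes
  simp only [show (List.foldl pvAStep1 pvInit nodes).1 = pvF nodes from rfl] at h2 h3
  rw [show (nodes.foldl pvAStep1 pvInit).1 = pvF nodes from rfl, pvEnum, List.foldl_map, pvRunA]
  apply PySem.List.foldl_congr_mem
  intro acc k hk
  have hkn := List.mem_range.mp hk
  have hvm : pvVal (pvF nodes) k ∈ pvF nodes := pvVal_mem hkn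
  simp only [pvAStep2, pvStepK, h2, h3, if_pos hvm, Option.getD_some, Nat.cast_inj,
    pvPyGetNegOne]

lemma pvA_cross (nodes : List Int) (h : pvCross (pvF nodes)) :
    find_max_valid_sequence nodes = -1 := by
  obtain ⟨hbad, -⟩ := pvRunA_spec (pvF nodes) (pvF nodes).length (le_refl _)
  simp only [find_max_valid_sequence, pvA_fold]
  rw [if_pos (Or.inl (hbad ((pvBad_iff_cross _).mpr h)))]

lemma pvA_nocross (nodes : List Int) (h : ¬ pvCross (pvF nodes)) :
    find_max_valid_sequence nodes = pvMaxAt (pvF nodes) (pvF nodes).length := by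
  obtain ⟨-, hgood⟩ := pvRunA_spec (pvF nodes) (pvF nodes).length (le_refl _)
  simp only [find_max_valid_sequence, pvA_fold]
  rw [hgood (fun hb => h ((pvBad_iff_cross _).mp hb))]
  simp [pvOpen_full]

-- ========== B's filtered list is A's ==========

lemma pvFiltB (nodes : List Int) :
    ((PySem.List.enumerate nodes).filter
      (fun p => p.1 == 0 || !(PySem.List.pyGetD nodes (p.1 - 1) 0 == p.2))).map (·.2)
    = pvF nodes := by
  induction nodes using List.reverseRecOn with
  | nil => rfl
  | append_singleton l x ih =>
    obtain ⟨ih1, -, -⟩ := pvFold1_spec l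
    have henum : PySem.List.enumerate (l ++ [x]) =
        PySem.List.enumerate l ++ [((l.length : Int), x)] := by
      rw [PySem.List.enumerate_append]
      simp [PySem.List.enumerate_cons, PySem.List.enumerate_nil]
    have hpref : (PySem.List.enumerate l).filter
        (fun p => p.1 == 0 || !(PySem.List.pyGetD (l ++ [x]) (p.1 - 1) 0 == p.2)) =
        (PySem.List.enumerate l).filter
        (fun p => p.1 == 0 || !(PySem.List.pyGetD l (p.1 - 1) 0 == p.2)) := by
      apply List.filter_congr
      intro p hp
      rcases (PySem.List.mem_enumerate_iff _ _ _).mp hp with ⟨k, hk, rfl⟩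
      simp only [zero_add]
      rcases Nat.eq_zero_or_pos k with rfl | hkpos
      · simp
      · have hcast : ((k : Int)) - 1 = ((k - 1 : Nat) : Int) := by omega
        rw [hcast, PySem.List.pyGetD_natCast, PySem.List.pyGetD_natCast,
          List.getD_append _ _ _ _ (by omega)]
    have hF : pvF (l ++ [x]) = (pvAStep1 (l.foldl pvAStep1 pvInit) x).1 := by
      rw [pvF, List.foldl_append, List.foldl_cons, List.foldl_nil]
    rw [henum, List.filter_append, hpref, List.map_append, ih, hF]
    cases hl : l.getLast? with
    | none =>
      have hlnil : l = [] := List.getLast?_eq_none_iff.mp hl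
      subst hlnil
      simp [pvAStep1, pvInit, pvF]
    | some y =>
      have hlne : l ≠ [] := by
        intro h; rw [h] at hl; simp at hl
      have hstne : (l.foldl pvAStep1 pvInit).1 ≠ [] := by
        intro h
        rw [← List.getLast?_eq_none_iff] at h
        rw [ih1, hl] at h; simp at h
      have hgetd : PySem.List.pyGetD (l ++ [x]) ((l.length : Int) - 1) 0 = y := by
        have hlp : 0 < l.length := List.length_pos_iff.mpr hlne
        have hcast : ((l.length : Int)) - 1 = ((l.length - 1 : Nat) : Int) := by omega
        rw [hcast, PySem.List.pyGetD_natCast, List.getD_append _ _ _ _ (by omega),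
          List.getD_eq_getElem _ _ (by omega), ← List.getLast_eq_getElem]
        exact Option.some_injective _ (by rw [← hl, List.getLast?_eq_some_getLast hlne])
      have hlen0 : ¬ ((l.length : Int) == 0) = true := by
        have : 0 < l.length := List.length_pos_iff.mpr hlne
        simp; omega
      rcases eq_or_ne x y with rfl | hxy
      · -- skipped by both
        have hcond : (l.foldl pvAStep1 pvInit).1 ≠ [] ∧
            PySem.List.pyGet? (l.foldl pvAStep1 pvInit).1 (-1) = some x := by
          refine ⟨hstne, ?_⟩
          rw [pvPyGetNegOne, ih1, hl]
        rw [pvAStep1, if_pos hcond]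
        simp [hlen0, hgetd, pvF]
      · -- kept by both
        have hcond : ¬ ((l.foldl pvAStep1 pvInit).1 ≠ [] ∧
            PySem.List.pyGet? (l.foldl pvAStep1 pvInit).1 (-1) = some x) := by
          rintro ⟨-, hc2⟩
          rw [pvPyGetNegOne, ih1, hl] at hc2
          exact hxy (by simpa using hc2.symm)
        rw [pvAStep1, if_neg hcond]
        simp [hlen0, hgetd, Ne.symm hxy, pvF]

-- ========== B's starts and intervals ==========

def pvStartsN (f : List Int) : List Nat :=
  (List.range f.length).filter (fun p => decide (pvStart f p))

lemma pvStartsB (f : List Int) :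
    ((PySem.List.enumerate f).filter
      (fun p => !(PySem.List.slice f none (some p.1)).contains p.2)).map (·.1)
    = (pvStartsN f).map (fun (k : Nat) => (k : Int)) := by
  rw [pvEnum, List.filter_map, List.map_map, pvStartsN]
  have : ∀ pl : List Nat, pl.map ((·.1) ∘ (fun (k : Nat) => ((k : Int), pvVal f k)))
      = pl.map (fun (k : Nat) => (k : Int)) := fun pl => rfl
  rw [this]
  congr 1
  apply List.filter_congr
  intro k hk
  have hkn := List.mem_range.mp hk
  have hvm : pvVal f k ∈ f := pvVal_mem hkn
  simp only [Function.comp, PySem.List.slice_to_natCast]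
  have hmt := pvMemTake (l := f) (k := k) hvm
  have hle := pvS_le hkn
  have hiff : (¬ pvVal f k ∈ f.take k) ↔ pvStart f k := by
    rw [hmt]
    simp only [pvStart, pvS] at *
    omega
  by_cases hst : pvStart f k
  · simp [hiff.mpr hst]
    exact hst
  · have hmem2 : pvVal f k ∈ f.take k := by by_contra hm; exact hst (hiff.mp hm)
    simp [hmem2]
    exact hst

lemma pvMaxDChar (xs : List Int) (m : Int) (hmem : m ∈ xs) (hmax : ∀ y ∈ xs, y ≤ m) :
    PySem.List.maxD xs (fun x => x) 0 = m := by
  cases hw : PySem.List.max? xs (fun x => x) with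
  | none =>
    rw [PySem.List.max?_eq_none_iff] at hw
    rw [hw] at hmem
    simp at hmem
  | some w =>
    have h1 : w ∈ xs := PySem.List.max?_mem hw
    have h2 : ∀ y ∈ xs, y ≤ w := PySem.List.max?_isMax hw
    have : w = m := le_antisymm (hmax w h1) (h2 m hmem)
    rw [PySem.List.maxD, hw, this]
    rfl

lemma pvIvsB (f : List Int) :
    ((pvStartsN f).map (fun (k : Nat) => (k : Int))).map (fun s =>
      (s, PySem.List.maxD (((PySem.List.enumerate f).filter
            (fun q => q.2 == PySem.List.pyGetD f s 0)).map (·.1)) (fun q => q) 0))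
    = (pvStartsN f).map (fun (k : Nat) => ((k : Int), ((pvE f (pvVal f k) : Nat) : Int))) := by
  rw [List.map_map]
  apply List.map_congr_left
  intro k hk
  have hkn := List.mem_range.mp (List.mem_filter.mp hk).1
  have hvm : pvVal f k ∈ f := pvVal_mem hkn
  simp only [Function.comp_apply]
  congr 1
  rw [PySem.List.pyGetD_natCast]
  have hval : f.getD k 0 = pvVal f k := rfl
  rw [hval, pvEnum, List.filter_map, List.map_map]
  have hmapeq : ∀ pl : List Nat, pl.map ((·.1) ∘ (fun (j : Nat) => ((j : Int), pvVal f j)))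
      = pl.map (fun (j : Nat) => (j : Int)) := fun pl => rfl
  rw [hmapeq]
  apply pvMaxDChar
  · rw [List.mem_map]
    refine ⟨pvE f (pvVal f k), ?_, rfl⟩
    rw [List.mem_filter]
    refine ⟨List.mem_range.mpr (pvE_lt hvm), ?_⟩
    simp only [Function.comp_apply]
    simp [pvVal_pvE hvm]
  · intro y hy
    rcases List.mem_map.mp hy with ⟨j, hj, rfl⟩
    obtain ⟨hjr, hjv⟩ := List.mem_filter.mp hj
    have hjn := List.mem_range.mp hjr
    simp only [Function.comp_apply, beq_iff_eq] at hjv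
    have := pvle_E hjn
    rw [hjv] at this
    exact_mod_cast this

-- ========== B's crossing test and depth formula ==========

lemma pvAnyCross (f : List Int) :
    (((pvStartsN f).map (fun (k : Nat) => ((k : Int), ((pvE f (pvVal f k) : Nat) : Int)))).any
      (fun p1 => ((pvStartsN f).map
          (fun (k : Nat) => ((k : Int), ((pvE f (pvVal f k) : Nat) : Int)))).any
        (fun p2 => p1.1 < p2.1 && p2.1 ≤ p1.2 && p1.2 < p2.2))) = true ↔ pvCross f := by
  simp only [List.any_eq_true, List.mem_map, pvStartsN, List.mem_filter, List.mem_range,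
    decide_eq_true_eq, Bool.and_eq_true, decide_eq_true_eq]
  constructor
  · rintro ⟨p1, ⟨k1, ⟨⟨hk1n, hk1s⟩, rfl⟩⟩, p2, ⟨k2, ⟨⟨hk2n, hk2s⟩, rfl⟩⟩, ⟨hc1, hc2⟩, hc3⟩
    exact ⟨k1, k2, hk1n, hk2n, hk1s, hk2s, by simpa using hc1, by simpa using hc2,
      by simpa using hc3⟩
  · rintro ⟨p, q, hp, hq, hps, hqs, hpq, hle, hlt⟩
    exact ⟨_, ⟨p, ⟨hp, hps⟩, rfl⟩, _, ⟨q, ⟨hq, hqs⟩, rfl⟩,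
      ⟨by simpa using hpq, by simpa using hle⟩, by simpa using hlt⟩

lemma pvSumCov (f : List Int) (i : Nat) :
    (((pvStartsN f).map (fun (k : Nat) => ((k : Int), ((pvE f (pvVal f k) : Nat) : Int)))).map
      (fun p => if p.1 ≤ ((i : Nat) : Int) ∧ ((i : Nat) : Int) ≤ p.2 then (1 : Int) else 0)).sum
      = ((pvCov f i : Nat) : Int) := by
  rw [List.map_map]
  have h1 : ∀ k ∈ pvStartsN f,
      ((fun p => if p.1 ≤ ((i : Nat) : Int) ∧ ((i : Nat) : Int) ≤ p.2 then (1 : Int) else 0) ∘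
        (fun (k : Nat) => ((k : Int), ((pvE f (pvVal f k) : Nat) : Int)))) k
      = (fun (k : Nat) =>
          if (fun (k : Nat) => decide (k ≤ i ∧ i ≤ pvE f (pvVal f k))) k = true
          then (1 : Int) else 0) k := by
    intro k hk
    simp only [Function.comp_apply, decide_eq_true_eq]
    exact if_congr (by constructor <;> (intro h; constructor <;> [exact_mod_cast h.1; exact_mod_cast h.2])) rfl rfl
  rw [List.map_congr_left h1, PySem.List.sum_map_ite_one_zero]
  rw [pvStartsN, List.countP_filter, pvCov, pvCovL, ← List.countP_eq_length_filter]
  congr 1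
  apply List.countP_congr
  intro p hp
  simp only [Bool.and_eq_true, decide_eq_true_eq]
  constructor
  · rintro ⟨⟨h1', h2'⟩, h3'⟩; exact ⟨h3', h1', h2'⟩
  · rintro ⟨h1', h2', h3'⟩; exact ⟨⟨h2', h3'⟩, h1'⟩

lemma pvMaxDFold (xs : List Int) (h : ∀ x ∈ xs, 0 ≤ x) :
    PySem.List.maxD xs (fun x => x) 0 = xs.foldl (fun m x => max m x) 0 := by
  cases hw : PySem.List.max? xs (fun x => x) with
  | none =>
    rw [PySem.List.max?_eq_none_iff] at hw
    rw [hw]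
    rfl
  | some w =>
    have h1 : w ∈ xs := PySem.List.max?_mem hw
    have h2 : ∀ y ∈ xs, y ≤ w := PySem.List.max?_isMax hw
    have hF := PySem.List.le_foldl_max xs (0 : Int)
    have hFm := PySem.List.foldl_max_mem xs (0 : Int)
    have hwF : w ≤ xs.foldl max 0 := hF.2 w h1
    have hFw : xs.foldl max 0 ≤ w := by
      rcases hFm with h0 | hm
      · rw [h0]; exact h w h1
      · exact h2 _ hm
    have : xs.foldl max 0 = w := le_antisymm hFw hwF
    rw [PySem.List.maxD, hw]
    simpa using this.symm

lemma pvMaxB (f : List Int) :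
    PySem.List.maxD ((PySem.List.pyRange 0 ((f.length : Int))).map
      (fun i => (((pvStartsN f).map
          (fun (k : Nat) => ((k : Int), ((pvE f (pvVal f k) : Nat) : Int)))).map
        (fun p => if p.1 ≤ i ∧ i ≤ p.2 then (1 : Int) else 0)).sum))
      (fun x => x) 0 = pvMaxAt f f.length := by
  rw [PySem.List.pyRange_zero, List.map_map, Int.toNat_natCast]
  have h1 : ∀ k ∈ List.range f.length,
      ((fun i => (((pvStartsN f).map
          (fun (k : Nat) => ((k : Int), ((pvE f (pvVal f k) : Nat) : Int)))).map
        (fun p => if p.1 ≤ i ∧ i ≤ p.2 then (1 : Int) else 0)).sum) ∘ (fun (k : Nat) => (k : Int))) k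
      = (fun (k : Nat) => ((pvCov f k : Nat) : Int)) k := by
    intro k hk
    simp only [Function.comp_apply]
    exact pvSumCov f k
  rw [List.map_congr_left h1]
  rw [pvMaxDFold _ (by rintro x hx; rcases List.mem_map.mp hx with ⟨k, -, rfl⟩; positivity)]
  rw [List.foldl_map]
  rfl

-- ========== B computes the interval formula ==========

lemma pvB_cross (nodes : List Int) (h : pvCross (pvF nodes)) :
    find_max_valid_sequence_alt nodes = -1 := by
  simp only [find_max_valid_sequence_alt, pvFiltB, pvStartsB, pvIvsB]
  rw [if_pos ((pvAnyCross (pvF nodes)).mpr h)]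

lemma pvB_nocross (nodes : List Int) (h : ¬ pvCross (pvF nodes)) :
    find_max_valid_sequence_alt nodes = pvMaxAt (pvF nodes) (pvF nodes).length := by
  simp only [find_max_valid_sequence_alt, pvFiltB, pvStartsB, pvIvsB]
  rw [if_neg (fun hc => h ((pvAnyCross (pvF nodes)).mp hc))]
  exact pvMaxB (pvF nodes)


-- ===== VERDICT (by name: the statement is the Claim_ definition above) =====
theorem find_max_valid_sequence_spec : Claim_equal_find_max_valid_sequence := by
  intro nodes _
  show find_max_valid_sequence nodes = find_max_valid_sequence_alt nodes
  by_cases h : pvCross (pvF nodes)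
  · rw [pvA_cross nodes h, pvB_cross nodes h]
  · rw [pvA_nocross nodes h, pvB_nocross nodes h]
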